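-- pv_equiv track=rewrite | github.com/gurram46/Context-Engine | context_engine/core/utils.py | deduplicate_content
-- ===== SOURCE A (Python) =====
-- def deduplicate_content(content: str) -> str:
--     """Remove duplicate patterns from content"""
--     lines = content.split('\n')
--     seen = set()
--     result = []
--
--     for line in lines:
--         stripped = line.strip()
--         if stripped and stripped not in seen:
--             seen.add(stripped)
--             result.append(line)
--         elif not stripped:
--             # keep single blank lines only
--             if result and result[-1].strip() == "":
--                 continue
--             result.append("")
--
--     return '\n'.join(result)
-- ===== SOURCE B (Python) =====
-- def deduplicate_content(content: str) -> str:
--     """Remove duplicate patterns from content (two-pass decomposition)."""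
--     # Pass 1: drop duplicate non-blank lines (keyed on strip), normalise blanks to ""
--     seen = set()
--     intermediate = []
--     for line in content.split('\n'):
--         stripped = line.strip()
--         if not stripped:
--             intermediate.append("")
--         elif stripped not in seen:
--             seen.add(stripped)
--             intermediate.append(line)
--     # Pass 2: collapse runs of consecutive blank lines into a single blank
--     out = []
--     prev_blank = False
--     for line in intermediate:
--         if line == "":
--             if not prev_blank:
--                 out.append("")
--             prev_blank = True
--         else:
--             out.append(line)
--             prev_blank = False
--     return '\n'.join(out)
-- ===== Notes on version B (the rewrite author's own statement) =====
-- stated objective: alternative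
-- what changed: Replaces A's single interleaved loop (which checks the last element of the result list to decide blank handling) with two independent passes: pass 1 removes duplicate non-blank lines keyed on the stripped value and normalises blank lines to empty, pass 2 collapses runs of consecutive blanks with a previous-line-is-blank flag.
import Mathlib
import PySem

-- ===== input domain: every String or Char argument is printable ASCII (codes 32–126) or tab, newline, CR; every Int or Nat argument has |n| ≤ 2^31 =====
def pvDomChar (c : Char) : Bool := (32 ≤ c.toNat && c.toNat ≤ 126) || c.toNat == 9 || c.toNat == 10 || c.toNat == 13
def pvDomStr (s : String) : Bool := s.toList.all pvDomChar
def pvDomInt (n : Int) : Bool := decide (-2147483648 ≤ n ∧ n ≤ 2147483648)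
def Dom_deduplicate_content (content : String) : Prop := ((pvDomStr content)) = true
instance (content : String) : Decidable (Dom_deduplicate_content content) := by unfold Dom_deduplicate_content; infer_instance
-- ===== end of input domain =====

-- B replaces A's single interleaved loop with two independent passes (dedup, then blank-collapse); alternative decomposition, same cost.

-- ===== PORT A =====
-- Python: result and result[-1].strip() == ""
def pvBlankLastA (res : List String) : Bool :=
  match res.getLast? with
  | some l => PySem.Str.strip l == ""
  | none => false

def pvDedupA_loop : List String → PySem.Set String → List String → List String
  | [], _, res => res
  | line :: rest, seen, res =>
    let stripped := PySem.Str.strip line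
    if stripped ≠ "" ∧ ¬ seen.contains stripped then
      pvDedupA_loop rest (seen.add stripped) (res ++ [line])
    else if stripped = "" then
      if pvBlankLastA res then pvDedupA_loop rest seen res
      else pvDedupA_loop rest seen (res ++ [""])
    else
      pvDedupA_loop rest seen res

def deduplicate_content (content : String) : String :=
  PySem.Str.join "\n" (pvDedupA_loop ((PySem.Str.split? content "\n").getD []) PySem.Set.empty [])

-- ===== PORT B =====
-- Pass 1: drop duplicate non-blank lines (keyed on strip), normalise blanks to ""
def pvDedupB_pass1 : List String → PySem.Set String → List String
  | [], _ => []
  | line :: rest, seen =>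
    let stripped := PySem.Str.strip line
    if stripped = "" then "" :: pvDedupB_pass1 rest seen
    else if seen.contains stripped then pvDedupB_pass1 rest seen
    else line :: pvDedupB_pass1 rest (seen.add stripped)

-- Pass 2: collapse runs of consecutive blank lines into a single blank
def pvDedupB_pass2 : List String → Bool → List String
  | [], _ => []
  | line :: rest, prevBlank =>
    if line = "" then
      if prevBlank then pvDedupB_pass2 rest true
      else "" :: pvDedupB_pass2 rest true
    else line :: pvDedupB_pass2 rest false

def deduplicate_content_alt (content : String) : String :=
  PySem.Str.join "\n"
    (pvDedupB_pass2 (pvDedupB_pass1 ((PySem.Str.split? content "\n").getD []) PySem.Set.empty) false)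

-- ===== PRECONDITION & SPEC =====
def Spec_deduplicate_content (content : String) (out : String) : Prop := out = deduplicate_content_alt content
instance (content : String) (out : String) : Decidable (Spec_deduplicate_content content out) := by unfold Spec_deduplicate_content; infer_instance

-- ===== CLAIM (what is proved, stated in full; the proofs are below) =====
def Claim_equal_deduplicate_content : Prop := ∀ (content : String), Dom_deduplicate_content content → Spec_deduplicate_content content (deduplicate_content content)

-- ===== LEMMAS AND PROOFS =====

theorem pvBlankLast_concat (res : List String) (l : String) :
    pvBlankLastA (res ++ [l]) = (PySem.Str.strip l == "") := by
  simp [pvBlankLastA]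

theorem pvDedup_main (lines : List String) :
    ∀ (seen : PySem.Set String) (res : List String) (pb : Bool),
      pb = pvBlankLastA res →
      pvDedupA_loop lines seen res = res ++ pvDedupB_pass2 (pvDedupB_pass1 lines seen) pb := by
  induction lines with
  | nil => intro seen res pb _; simp [pvDedupA_loop, pvDedupB_pass1, pvDedupB_pass2]
  | cons line rest ih =>
    intro seen res pb hpb
    by_cases hs : PySem.Str.strip line = ""
    · -- blank line
      have hA : pvDedupA_loop (line :: rest) seen res =
          (if pvBlankLastA res then pvDedupA_loop rest seen res
           else pvDedupA_loop rest seen (res ++ [""])) := by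
        simp [pvDedupA_loop, hs]
      have hB : pvDedupB_pass1 (line :: rest) seen = "" :: pvDedupB_pass1 rest seen := by
        simp [pvDedupB_pass1, hs]
      rw [hA, hB]
      by_cases hb : pvBlankLastA res = true
      · have : pb = true := by rw [hpb, hb]
        subst this
        rw [if_pos hb]
        rw [ih seen res true hb.symm]
        simp [pvDedupB_pass2]
      · have hbf : pvBlankLastA res = false := by simpa using hb
        have : pb = false := by rw [hpb, hbf]
        subst this
        rw [if_neg (by simp [hbf])]
        rw [ih seen (res ++ [""]) true (by simp [pvBlankLast_concat]; decide)]
        simp [pvDedupB_pass2]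
    · by_cases hc : seen.contains (PySem.Str.strip line) = true
      · -- duplicate: both skip
        have hmem : PySem.Str.strip line ∈ seen := (PySem.Set.contains_iff _ _).mp hc
        have hA : pvDedupA_loop (line :: rest) seen res = pvDedupA_loop rest seen res := by
          simp [pvDedupA_loop, hs, hmem]
        have hB : pvDedupB_pass1 (line :: rest) seen = pvDedupB_pass1 rest seen := by
          simp [pvDedupB_pass1, hs, hmem]
        rw [hA, hB, ih seen res pb hpb]
      · -- new non-blank line: both keep
        have hnm : PySem.Str.strip line ∉ seen := fun h => hc ((PySem.Set.contains_iff _ _).mpr h)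
        have hA : pvDedupA_loop (line :: rest) seen res =
            pvDedupA_loop rest (seen.add (PySem.Str.strip line)) (res ++ [line]) := by
          simp [pvDedupA_loop, hs, hnm]
        have hB : pvDedupB_pass1 (line :: rest) seen =
            line :: pvDedupB_pass1 rest (seen.add (PySem.Str.strip line)) := by
          simp [pvDedupB_pass1, hs, hnm]
        have hline : line ≠ "" := by
          intro h; subst h; exact hs rfl
        rw [hA, hB]
        rw [ih (seen.add (PySem.Str.strip line)) (res ++ [line]) false
              (by simp [pvBlankLast_concat, hs])]
        simp [pvDedupB_pass2, hline]

-- ===== VERDICT (by name: the statement is the Claim_ definition above) =====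
theorem deduplicate_content_spec : Claim_equal_deduplicate_content := by
  intro content _
  unfold Spec_deduplicate_content deduplicate_content deduplicate_content_alt
  rw [pvDedup_main _ _ [] false (by simp [pvBlankLastA])]
  simp
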